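-- pv_equiv track=rewrite | github.com/jacobbamio/core-oss | core-api/api/services/email/google_api_helpers.py | parse_email_headers
-- ===== SOURCE A (Python) =====
-- from typing import Optional, Dict, Any, List
--
-- def parse_email_headers(headers: List[Dict[str, str]]) -> Dict[str, str]:
--     """
--     Parse email headers into a more accessible dictionary
--
--     Args:
--         headers: List of header dicts from Gmail API
--
--     Returns:
--         Dict with common headers (From, To, Subject, Date, etc.)
--     """
--     parsed = {}
--     for header in headers:
--         name = header.get('name', '').lower()
--         value = header.get('value', '')
--
--         if name in ['from', 'to', 'subject', 'date', 'cc', 'bcc', 'message-id', 'in-reply-to', 'references']: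
--             parsed[name] = value
--
--     return parsed
-- ===== SOURCE B (Python) =====
-- KNOWN_HEADERS = {'from', 'to', 'subject', 'date', 'cc', 'bcc',
--                  'message-id', 'in-reply-to', 'references'}
--
-- def parse_email_headers(headers):
--     # Phase 1: index every header by its lowercased name (last occurrence wins).
--     index = {}
--     for header in headers:
--         index[header.get('name', '').lower()] = header.get('value', '')
--     # Phase 2: project the index onto the fixed set of known header names.
--     return {name: value for name, value in index.items() if name in KNOWN_HEADERS}
-- ===== Notes on version B (the rewrite author's own statement) =====
-- stated objective: alternative
-- what changed: A filters each header against the known-name list while scanning; B first builds a complete lowercased-name-to-value index dict over all headers and then, in a separate pass, projects that index onto the fixed known set with a dict comprehension.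
import Mathlib
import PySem

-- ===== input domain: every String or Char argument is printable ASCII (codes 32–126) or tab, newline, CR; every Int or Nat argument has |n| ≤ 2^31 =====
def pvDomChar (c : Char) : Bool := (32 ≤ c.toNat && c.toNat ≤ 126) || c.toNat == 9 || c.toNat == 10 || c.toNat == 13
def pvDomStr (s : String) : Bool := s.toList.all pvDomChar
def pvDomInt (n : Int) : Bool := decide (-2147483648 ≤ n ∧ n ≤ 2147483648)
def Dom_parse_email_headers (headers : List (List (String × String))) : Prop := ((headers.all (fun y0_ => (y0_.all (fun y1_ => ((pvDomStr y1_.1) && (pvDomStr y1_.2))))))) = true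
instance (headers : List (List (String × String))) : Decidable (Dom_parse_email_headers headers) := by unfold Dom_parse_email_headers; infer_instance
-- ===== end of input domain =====

-- B replaces A's filter-during-the-scan by index-everything-then-project (alternative decomposition, same cost).

-- ===== PORT A =====
-- A: one scan, inserting only the known names as they come.
def parse_email_headers (headers : List (List (String × String))) : List (String × String) :=
  (headers.foldl
    (fun parsed header =>
      let name := PySem.Str.lower ((PySem.Dict.mk header).getD "name" "")
      let value := (PySem.Dict.mk header).getD "value" ""
      if ["from", "to", "subject", "date", "cc", "bcc", "message-id", "in-reply-to", "references"].contains name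
      then parsed.insert name value
      else parsed)
    PySem.Dict.empty).items

-- ===== PORT B =====
def pvKnownSet : PySem.Set String :=
  PySem.Set.ofList ["from", "to", "subject", "date", "cc", "bcc", "message-id", "in-reply-to", "references"]

-- B: build the full index dict, then project it onto pvKnownSet.  The dict comprehension runs over
-- index.items, whose keys are distinct, so it is ported exactly as the filter of the items list.
def parse_email_headers_alt (headers : List (List (String × String))) : List (String × String) :=
  let index := headers.foldl
    (fun idx header =>
      idx.insert (PySem.Str.lower ((PySem.Dict.mk header).getD "name" ""))
                 ((PySem.Dict.mk header).getD "value" ""))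
    PySem.Dict.empty
  index.items.filter (fun p => pvKnownSet.contains p.1)

-- ===== PRECONDITION & SPEC =====
def Spec_parse_email_headers (headers : List (List (String × String))) (out : List (String × String)) : Prop := out = parse_email_headers_alt headers
instance (headers : List (List (String × String))) (out : List (String × String)) : Decidable (Spec_parse_email_headers headers out) := by unfold Spec_parse_email_headers; infer_instance

-- ===== CLAIM (what is proved, stated in full; the proofs are below) =====
def Claim_equal_parse_email_headers : Prop := ∀ (headers : List (List (String × String))), Dom_parse_email_headers headers → Spec_parse_email_headers headers (parse_email_headers headers)

-- ===== LEMMAS AND PROOFS =====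

-- the known-name list and predicate shared by the proofs
def pvK : List String :=
  ["from", "to", "subject", "date", "cc", "bcc", "message-id", "in-reply-to", "references"]

def pvQ (p : String × String) : Bool := pvK.contains p.1

lemma pvKnownSet_contains_eq (p : String × String) : pvKnownSet.contains p.1 = pvQ p := by
  have h : pvKnownSet = pvK := by decide
  rw [h, PySem.Set.contains_eq_listContains]
  rfl

-- filter pvQ commutes with the replace-at-key map that Dict.insert performs on items
lemma pv_filter_map_replace (k : String) (v : String) (xs : List (String × String)) :
    (xs.map (fun p => if p.1 == k then (k, v) else p)).filter pvQ
      = (xs.filter pvQ).map (fun p => if p.1 == k then (k, v) else p) := by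
  rw [List.filter_map]
  congr 1
  apply List.filter_congr
  intro p _
  by_cases h : p.1 = k <;> simp [pvQ, h]

lemma pv_map_replace_id_of_not_known (k : String) (v : String)
    (hk : pvK.contains k = false) (xs : List (String × String)) :
    (xs.filter pvQ).map (fun p => if p.1 == k then (k, v) else p) = xs.filter pvQ := by
  have h : ∀ p ∈ xs.filter pvQ, (fun p : String × String => if p.1 == k then (k, v) else p) p = p := by
    intro p hp
    have hq : pvK.contains p.1 = true := (List.mem_filter.mp hp).2
    have hne : p.1 ≠ k := by
      intro he
      rw [he, hk] at hq
      cases hq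
    simp [hne]
  rw [List.map_congr_left h, List.map_id']

-- membership transfer: A's accumulator contains k iff B's does and k is known
lemma pv_contains_of_filter {dA dB : PySem.Dict String String}
    (hinv : dA.items = dB.items.filter pvQ) (k : String) :
    dA.contains k = (dB.contains k && pvK.contains k) := by
  rw [PySem.Dict.contains_eq_decide_mem_keys, PySem.Dict.contains_eq_decide_mem_keys]
  simp only [PySem.Dict.keys, hinv]
  by_cases hq : pvK.contains k = true
  · rw [hq, Bool.and_true]
    rw [decide_eq_decide]
    constructor
    · intro hm
      obtain ⟨p, hp, hpk⟩ := List.mem_map.mp hm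
      exact List.mem_map.mpr ⟨p, (List.mem_filter.mp hp).1, hpk⟩
    · intro hm
      obtain ⟨p, hp, hpk⟩ := List.mem_map.mp hm
      refine List.mem_map.mpr ⟨p, List.mem_filter.mpr ⟨hp, ?_⟩, hpk⟩
      show pvK.contains p.1 = true
      rw [hpk, hq]
  · have hq0 : pvK.contains k = false := eq_false_of_ne_true hq
    rw [hq0, Bool.and_false]
    apply decide_eq_false
    intro hm
    obtain ⟨p, hp, hpk⟩ := List.mem_map.mp hm
    have hq1 : pvK.contains p.1 = true := (List.mem_filter.mp hp).2
    rw [hpk, hq0] at hq1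
    cases hq1

-- the loop invariant: A's dict's items are the pvQ-filter of B's dict's items
lemma pv_main (l : List (List (String × String))) :
    ∀ (dA dB : PySem.Dict String String),
      dA.items = dB.items.filter pvQ →
      (l.foldl
        (fun parsed header =>
          let name := PySem.Str.lower ((PySem.Dict.mk header).getD "name" "")
          let value := (PySem.Dict.mk header).getD "value" ""
          if ["from", "to", "subject", "date", "cc", "bcc", "message-id", "in-reply-to", "references"].contains name
          then parsed.insert name value
          else parsed) dA).items
        = ((l.foldl
            (fun idx header =>
              idx.insert (PySem.Str.lower ((PySem.Dict.mk header).getD "name" ""))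
                         ((PySem.Dict.mk header).getD "value" "")) dB).items).filter pvQ := by
  induction l with
  | nil => intro dA dB hinv; simpa using hinv
  | cons h t ih =>
    intro dA dB hinv
    simp only [List.foldl_cons]
    set k := PySem.Str.lower ((PySem.Dict.mk h).getD "name" "") with hkdef
    set v := (PySem.Dict.mk h).getD "value" "" with hvdef
    rw [show (["from", "to", "subject", "date", "cc", "bcc", "message-id", "in-reply-to", "references"] : List String) = pvK from rfl]
    apply ih
    have hcont := pv_contains_of_filter hinv k
    by_cases hq : pvK.contains k = true
    · rw [if_pos hq]
      by_cases hc : dB.contains k = true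
      · have hcA : dA.contains k = true := by rw [hcont, hc, hq]; rfl
        rw [PySem.Dict.items_insert_of_contains _ _ hc,
            PySem.Dict.items_insert_of_contains _ _ hcA,
            pv_filter_map_replace, hinv]
      · have hc' : dB.contains k = false := eq_false_of_ne_true hc
        have hcA : dA.contains k = false := by rw [hcont, hc']; rfl
        rw [PySem.Dict.items_insert_of_not_contains _ _ hc',
            PySem.Dict.items_insert_of_not_contains _ _ hcA,
            List.filter_append, hinv]
        have hsing : List.filter pvQ [(k, v)] = [(k, v)] := by
          simp only [List.filter, pvQ]
          rw [hq]
        rw [hsing]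
    · have hq0 : pvK.contains k = false := eq_false_of_ne_true hq
      rw [if_neg (by rw [hq0]; simp)]
      by_cases hc : dB.contains k = true
      · rw [PySem.Dict.items_insert_of_contains _ _ hc,
            pv_filter_map_replace, pv_map_replace_id_of_not_known k v hq0, hinv]
      · have hc' : dB.contains k = false := eq_false_of_ne_true hc
        rw [PySem.Dict.items_insert_of_not_contains _ _ hc',
            List.filter_append, hinv]
        have hsing : List.filter pvQ [(k, v)] = [] := by
          simp only [List.filter, pvQ]
          rw [hq0]
        rw [hsing, List.append_nil]

-- ===== VERDICT (by name: the statement is the Claim_ definition above) =====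
theorem parse_email_headers_spec : Claim_equal_parse_email_headers := by
  intro headers _
  show parse_email_headers headers = parse_email_headers_alt headers
  unfold parse_email_headers parse_email_headers_alt
  simp only [pvKnownSet_contains_eq]
  exact pv_main headers PySem.Dict.empty PySem.Dict.empty rfl
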